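-- pv_equiv track=rewrite | github.com/Rius2g/Quantum-Compute-challenge | quantum.py | find_valid_a
-- ===== SOURCE A (Python) =====
-- from math import gcd
--
-- def find_valid_a(N):
--     valid_a = []
--
--     def order_mod(a, n):
--         if gcd(a, n) != 1:
--             return 0
--         for i in range(1, n):
--             if pow(a, i, n) == 1:
--                 return i
--         return 0
--
--     for a in range(2, N):
--         if gcd(a, N) == 1:
--             order = order_mod(a, N)
--             if order > 2:
--                 valid_a.append(a)
--
--     return valid_a
-- ===== SOURCE B (Python) =====
-- from math import gcd
--
-- def find_valid_a(N):
--     # order of a mod N exceeds 2 iff a != 1 (true for 2 <= a < N) and a^2 % N != 1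
--     return [a for a in range(2, N) if gcd(a, N) == 1 and pow(a, 2, N) != 1]
-- ===== Notes on version B (the rewrite author's own statement) =====
-- stated objective: faster
-- what changed: B replaces the inner order-finding loop (trying every exponent i in [1,N)) by the observation that for 2 <= a < N the multiplicative order exceeds 2 exactly when a^2 % N != 1, so B is a single filtering pass computing gcd and one modular square per candidate.
import Mathlib
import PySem

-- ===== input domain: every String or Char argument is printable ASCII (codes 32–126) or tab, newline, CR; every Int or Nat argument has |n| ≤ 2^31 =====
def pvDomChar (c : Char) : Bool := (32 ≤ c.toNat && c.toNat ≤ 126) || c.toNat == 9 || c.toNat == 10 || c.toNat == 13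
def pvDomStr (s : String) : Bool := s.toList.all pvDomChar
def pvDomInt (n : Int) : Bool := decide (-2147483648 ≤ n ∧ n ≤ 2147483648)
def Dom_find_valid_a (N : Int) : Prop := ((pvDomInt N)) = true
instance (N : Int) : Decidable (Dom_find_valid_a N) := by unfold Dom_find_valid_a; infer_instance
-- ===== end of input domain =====

-- B replaces A's inner order-search loop by a single a^2 % N != 1 test (order > 2 iff the square is not 1); asymptotically faster.

-- ===== PORT A =====
-- hand port of CPython's three-argument pow(a, e, m): binary exponentiation, reducing mod m after each
-- multiplication (PySem.Int.powMod computes a^e in full, which is not evaluable for the exponents A reaches);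
-- exact for a positive modulus: pyPowMod_eq below proves it equal to PySem.Int.powMod there (A only calls it with m = N ≥ 3)
def pyPowMod (a : Int) (e : Nat) (m : Int) : Int :=
  if he : e = 0 then PySem.Int.mod 1 m
  else
    let h := pyPowMod a (e / 2) m
    if e % 2 = 0 then PySem.Int.mod (h * h) m
    else PySem.Int.mod (h * h * PySem.Int.mod a m) m
termination_by e
decreasing_by exact Nat.div_lt_self (Nat.pos_of_ne_zero he) (by norm_num)

-- inner 'for i in range(1, n): if pow(a, i, n) == 1: return i' of order_mod; falls off the loop => 0.
-- i ≥ 1 inside range(1, n), so the Nat exponent i.toNat is exact.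
def orderLoop (a n : Int) : List Int → Int
  | [] => 0
  | i :: rest => if pyPowMod a i.toNat n == 1 then i else orderLoop a n rest

def order_mod (a n : Int) : Int :=
  if ((Int.gcd a n : Int) != 1) then 0
  else orderLoop a n (PySem.List.pyRange 1 n 1)

def find_valid_a (N : Int) : List Int :=
  (PySem.List.pyRange 2 N 1).foldl
    (fun valid_a a =>
      if ((Int.gcd a N : Int) == 1) then
        if 2 < order_mod a N then valid_a ++ [a] else valid_a
      else valid_a) []

-- ===== PORT B =====
def find_valid_a_alt (N : Int) : List Int :=
  (PySem.List.pyRange 2 N 1).filter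
    (fun a => ((Int.gcd a N : Int) == 1) && (PySem.Int.powMod a 2 N != 1))

-- ===== PRECONDITION & SPEC =====
def Spec_find_valid_a (N : Int) (out : List Int) : Prop := out = find_valid_a_alt N
instance (N : Int) (out : List Int) : Decidable (Spec_find_valid_a N out) := by unfold Spec_find_valid_a; infer_instance

-- ===== CLAIM (what is proved, stated in full; the proofs are below) =====
def Claim_equal_find_valid_a : Prop := ∀ (N : Int), Dom_find_valid_a N → Spec_find_valid_a N (find_valid_a N)

-- ===== LEMMAS AND PROOFS =====

-- the hand-ported pow agrees with the PySem primitive for a positive modulus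
lemma pyPowMod_eq {m : Int} (hm : 0 < m) : ∀ (e : Nat) (a : Int),
    pyPowMod a e m = PySem.Int.powMod a e m := by
  intro e
  induction e using Nat.strong_induction_on with
  | _ e ih =>
    intro a
    rw [pyPowMod]
    by_cases he : e = 0
    · simp [he, PySem.Int.powMod]
    · rw [dif_neg he]
      have ihh := ih (e / 2) (Nat.div_lt_self (Nat.pos_of_ne_zero he) (by norm_num)) a
      simp only [PySem.Int.powMod, PySem.Int.mod_eq_emod_of_pos hm] at ihh ⊢
      rw [ihh]
      by_cases hp : e % 2 = 0
      · rw [if_pos hp]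
        have h2 : ((a ^ (e / 2) % m) * (a ^ (e / 2) % m)) % m
            = (a ^ (e / 2) * a ^ (e / 2)) % m :=
          (Int.mod_modEq (a ^ (e / 2)) m).mul (Int.mod_modEq (a ^ (e / 2)) m)
        rw [h2, ← pow_add]
        have hee : e / 2 + e / 2 = e := by omega
        rw [hee]
      · rw [if_neg hp]
        have h2 : ((a ^ (e / 2) % m) * (a ^ (e / 2) % m) * (a % m)) % m
            = (a ^ (e / 2) * a ^ (e / 2) * a) % m :=
          ((Int.mod_modEq (a ^ (e / 2)) m).mul (Int.mod_modEq (a ^ (e / 2)) m)).mul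
            (Int.mod_modEq a m)
        rw [h2, ← pow_add, ← pow_succ]
        have hee : e / 2 + e / 2 + 1 = e := by omega
        rw [hee]

-- if every exponent in L exceeds 2 and some exponent in L hits a^i % n = 1, the scan returns a value > 2
lemma orderLoop_pos_of_hit (a n : Int) (hm : 0 < n) :
    ∀ L : List Int, (∀ i ∈ L, 2 < i) → (∃ i ∈ L, PySem.Int.powMod a i.toNat n = 1) →
      2 < orderLoop a n L := by
  intro L
  induction L with
  | nil => rintro _ ⟨i, hi, _⟩; exact absurd hi (List.not_mem_nil)
  | cons i rest ih =>
    rintro hgt ⟨j, hj, hhit⟩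
    simp only [orderLoop, pyPowMod_eq hm]
    by_cases h : PySem.Int.powMod a i.toNat n = 1
    · simp [h]; exact hgt i (by simp)
    · simp [h]
      apply ih (fun k hk => hgt k (by simp [hk]))
      rcases List.mem_cons.mp hj with rfl | hj'
      · exact absurd hhit h
      · exact ⟨j, hj', hhit⟩

-- some exponent i with 3 ≤ i < N satisfies a^i % N = 1 (Euler's theorem: i = totient N works)
lemma exists_hit (N a : Int) (h2 : 2 ≤ a) (hlt : a < N) (hg : Int.gcd a N = 1)
    (hsq : PySem.Int.powMod a 2 N ≠ 1) :
    ∃ i ∈ PySem.List.pyRange 3 N 1, PySem.Int.powMod a i.toNat N = 1 := by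
  have hN3 : 3 ≤ N := by omega
  set α := a.natAbs with hα
  set n := N.natAbs with hn
  have ha : (α : ℤ) = a := Int.natAbs_of_nonneg (by omega)
  have hNc : (n : ℤ) = N := Int.natAbs_of_nonneg (by omega)
  have hα2 : 2 ≤ α := by omega
  have hαn : α < n := by omega
  have hn3 : 3 ≤ n := by omega
  have hco : Nat.Coprime α n := hg
  set t := n.totient with htdef
  have ht : α ^ t % n = 1 % n := Nat.ModEq.pow_totient hco
  have h1n : 1 % n = 1 := Nat.mod_eq_of_lt (by omega)
  rw [h1n] at ht
  have htpos : 0 < t := Nat.totient_pos.mpr (by omega)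
  have htlt : t < n := Nat.totient_lt n (by omega)
  have hmodcast : ∀ k : ℕ, PySem.Int.powMod a k N = ((α ^ k % n : ℕ) : ℤ) := by
    intro k
    simp only [PySem.Int.powMod]
    rw [PySem.Int.mod_eq_emod_of_pos (by omega)]
    rw [← ha, ← hNc]
    push_cast
    ring_nf
  have ht1 : t ≠ 1 := by
    intro h1
    rw [h1, pow_one, Nat.mod_eq_of_lt hαn] at ht
    omega
  have ht2 : t ≠ 2 := by
    intro h2'
    apply hsq
    rw [hmodcast 2, ← h2', ht]
    rfl
  refine ⟨(t : ℤ), ?_, ?_⟩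
  · rw [PySem.List.mem_pyRange_one]
    constructor
    · exact_mod_cast (by omega : (3:ℕ) ≤ t)
    · rw [← hNc]; exact_mod_cast htlt
  · rw [Int.toNat_natCast, hmodcast t, ht]; rfl

-- for 2 ≤ a < N coprime to N, A's order test agrees with B's square test
lemma order_iff (N a : Int) (h2 : 2 ≤ a) (hlt : a < N) (hg : Int.gcd a N = 1) :
    (2 < order_mod a N) ↔ PySem.Int.powMod a 2 N ≠ 1 := by
  have hN3 : 3 ≤ N := by omega
  have hr : PySem.List.pyRange 1 N 1 = 1 :: 2 :: PySem.List.pyRange 3 N 1 := by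
    rw [PySem.List.pyRange_one_cons (by omega), PySem.List.pyRange_one_cons (by omega)]
    norm_num
  have hstep1 : PySem.Int.powMod a (1 : Int).toNat N = a := by
    simp only [PySem.Int.powMod, Int.toNat_one, pow_one]
    rw [PySem.Int.mod_eq_emod_of_pos (by omega)]
    exact Int.emod_eq_of_lt (by omega) hlt
  simp only [order_mod, hg]
  norm_num
  rw [hr]
  simp only [orderLoop, pyPowMod_eq (show (0:Int) < N by omega), hstep1]
  have ha1 : (a == 1) = false := by simp; omega
  rw [ha1]
  simp only [Bool.false_eq_true, if_false]
  by_cases hsq : PySem.Int.powMod a (2 : Int).toNat N = 1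
  · have h2' : ((2:Int).toNat) = 2 := rfl
    rw [h2'] at hsq
    simp [hsq]
  · have h2' : ((2:Int).toNat) = 2 := rfl
    rw [h2'] at hsq
    have hb : (PySem.Int.powMod a (2:Int).toNat N == 1) = false := by
      simp [h2']; exact hsq
    rw [hb]
    simp only [Bool.false_eq_true, if_false]
    constructor
    · intro _; exact hsq
    · intro _
      apply orderLoop_pos_of_hit _ _ (by omega)
      · intro i hi
        rw [PySem.List.mem_pyRange_one] at hi
        omega
      · exact exists_hit N a h2 hlt hg hsq

-- A's outer loop is an append-if fold: it builds acc ++ (filter of its combined test)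
lemma foldA (N : Int) : ∀ (L : List Int) (acc : List Int),
    L.foldl (fun valid_a a =>
      if ((Int.gcd a N : Int) == 1) then
        if 2 < order_mod a N then valid_a ++ [a] else valid_a
      else valid_a) acc
    = acc ++ L.filter (fun a => ((Int.gcd a N : Int) == 1) && decide (2 < order_mod a N))
  | [], acc => by simp
  | a :: L, acc => by
    simp only [List.foldl_cons, List.filter_cons]
    by_cases h1 : ((Int.gcd a N : Int) == 1) = true
    · by_cases h2 : 2 < order_mod a N
      · rw [if_pos h1, if_pos h2, foldA N L (acc ++ [a])]
        simp [h1, h2]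
      · rw [if_pos h1, if_neg h2, foldA N L acc]
        simp [h1, h2]
    · rw [if_neg h1, foldA N L acc]
      simp [h1]

-- ===== VERDICT (by name: the statement is the Claim_ definition above) =====
theorem find_valid_a_spec : Claim_equal_find_valid_a := by
  intro N _
  unfold Spec_find_valid_a find_valid_a find_valid_a_alt
  rw [foldA, List.nil_append]
  apply List.filter_congr
  intro a ha
  rw [PySem.List.mem_pyRange_one] at ha
  cases hgb : ((Int.gcd a N : Int) == 1) with
  | false => rfl
  | true =>
    have hg : Int.gcd a N = 1 := by exact_mod_cast (beq_iff_eq.mp hgb)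
    have hiff := order_iff N a ha.1 ha.2 hg
    simp only [Bool.true_and]
    by_cases h2 : 2 < order_mod a N
    · rw [decide_eq_true h2]
      exact (bne_iff_ne.mpr (hiff.mp h2)).symm
    · rw [decide_eq_false h2]
      have hp : PySem.Int.powMod a 2 N = 1 := by
        by_contra hc; exact h2 (hiff.mpr hc)
      simp [hp]
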